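-- pv_equiv track=rewrite | github.com/nikhilbommu/DS-PS-Algorithms | Leetcode/LeetCode Problems/MinimumSubsequenceInaNon-IncreasingOrder.py | minSubsequence
-- ===== SOURCE A (Python) =====
-- def minSubsequence(nums):
--     if len(nums) == 1:
--         return nums
--     nums = sorted(nums)
--     i = len(nums)-1
--     while i>0:
--         if sum(nums[i:]) > sum(nums[:i]):
--             return nums[i:][::-1]
--         elif sum(nums[i:]) == sum(nums[:i]):
--             return nums[i-1:][::-1]
--         i-=1
-- ===== SOURCE B (Python) =====
-- def minSubsequence(nums):
--     if len(nums) == 1: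
--         return nums
--     s = sorted(nums, reverse=True)
--     total = sum(s)
--     acc = 0
--     for k, x in enumerate(s):
--         acc += x
--         if acc > total - acc:
--             return s[:k+1]
--         if acc == total - acc:
--             return s[:k+2]
-- ===== Notes on version B (the rewrite author's own statement) =====
-- stated objective: faster
-- what changed: A sorts ascending and at each loop step recomputes sum(nums[i:]) and sum(nums[:i]) from slices (quadratic); B sorts once descending and makes a single pass maintaining one running sum compared against total-minus-running, returning a prefix of the descending list.
-- outside the precondition, e.g. on minSubsequence([]): A returns None, B returns None
import Mathlib
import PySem

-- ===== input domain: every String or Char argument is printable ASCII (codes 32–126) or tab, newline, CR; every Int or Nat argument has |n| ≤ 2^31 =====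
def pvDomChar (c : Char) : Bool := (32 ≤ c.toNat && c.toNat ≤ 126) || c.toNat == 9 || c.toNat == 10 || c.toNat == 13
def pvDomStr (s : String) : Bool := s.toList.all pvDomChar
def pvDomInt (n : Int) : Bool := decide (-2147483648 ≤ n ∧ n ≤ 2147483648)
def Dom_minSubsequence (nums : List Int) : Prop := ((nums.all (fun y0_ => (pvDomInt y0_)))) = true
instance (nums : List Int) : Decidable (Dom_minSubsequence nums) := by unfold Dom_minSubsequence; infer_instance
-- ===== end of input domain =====

-- B sorts once (descending) and keeps one running sum instead of A's re-summed slices per step; equivalence of return values proved on nonempty lists.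


-- ===== PORT A =====
-- A's 'while i>0' loop, recursing on i. Python falls through (returning None) only when
-- the loop exhausts, which happens only on the empty list (excluded by Pre_); base is [].
def minSubsequenceLoopA (s : List Int) : Nat → List Int
  | 0 => []
  | i+1 =>
    -- sum(nums[i:]) > sum(nums[:i])  (slices via PySem.List.slice, exact)
    if (PySem.List.slice s (some ((i+1 : Nat) : Int)) none).sum >
       (PySem.List.slice s none (some ((i+1 : Nat) : Int))).sum then
      (PySem.List.slice s (some ((i+1 : Nat) : Int)) none).reverse   -- nums[i:][::-1]
    else if (PySem.List.slice s (some ((i+1 : Nat) : Int)) none).sum =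
            (PySem.List.slice s none (some ((i+1 : Nat) : Int))).sum then
      (PySem.List.slice s (some ((i : Nat) : Int)) none).reverse     -- nums[i-1:][::-1]
    else minSubsequenceLoopA s i

def minSubsequence (nums : List Int) : List Int :=
  if nums.length == 1 then nums
  else
    let s := PySem.List.sorted nums (fun x => x) false
    minSubsequenceLoopA s (s.length - 1)

-- ===== PORT B =====
-- B's single pass over the descending sort: acc is the running sum, k the index.
-- Python's for-loop exhausts (returning None) only on the empty list (excluded by Pre_).
def minSubsequenceLoopB (s : List Int) (total : Int) : List Int → Int → Nat → List Int
  | [], _, _ => []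
  | x :: rest, acc, k =>
    let acc' := acc + x
    if acc' > total - acc' then s.take (k+1)        -- s[:k+1] (nonnegative bound: take is exact)
    else if acc' = total - acc' then s.take (k+2)   -- s[:k+2]
    else minSubsequenceLoopB s total rest acc' (k+1)

def minSubsequence_alt (nums : List Int) : List Int :=
  if nums.length == 1 then nums
  else
    let s := PySem.List.sorted nums (fun x => x) true
    minSubsequenceLoopB s s.sum s 0 0

-- ===== PRECONDITION & SPEC =====
-- Pre_ excludes only the empty list, on which Python A (and B) returns None, not a list.
def Pre_minSubsequence (nums : List Int) : Prop := nums ≠ []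
instance (nums : List Int) : Decidable (Pre_minSubsequence nums) := by unfold Pre_minSubsequence; infer_instance
def pvWitness_minSubsequence : List Int := [4, 3, 10, 9, 8]

def Spec_minSubsequence (nums : List Int) (out : List Int) : Prop := out = minSubsequence_alt nums
instance (nums : List Int) (out : List Int) : Decidable (Spec_minSubsequence nums out) := by unfold Spec_minSubsequence; infer_instance

-- ===== CLAIM (what is proved, stated in full; the proofs are below) =====
def Claim_equal_minSubsequence : Prop := ∀ (nums : List Int), Dom_minSubsequence nums → Pre_minSubsequence nums → Spec_minSubsequence nums (minSubsequence nums)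

-- ===== LEMMAS AND PROOFS =====

-- Python's sorted(xs, reverse=True) on ints is the reverse of sorted(xs).
lemma sorted_desc_eq_rev (xs : List Int) :
    PySem.List.sorted xs (fun x => x) true = (PySem.List.sorted xs (fun x => x) false).reverse := by
  refine List.Perm.eq_of_pairwise (le := fun a b : Int => b ≤ a)
    (fun a b _ _ h1 h2 => le_antisymm h2 h1) ?_ ?_ ?_
  · simpa using PySem.List.sorted_pairwise_rev xs (fun x => x)
  · rw [List.pairwise_reverse]; simpa using PySem.List.sorted_pairwise xs (fun x => x)
  · exact ((PySem.List.sorted_perm xs (fun x => x) true).trans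
      ((PySem.List.sorted_perm xs (fun x => x) false).symm)).trans
      (List.reverse_perm _).symm

-- a prefix of the reversed list is a reversed suffix
lemma take_rev_sum (t : List Int) (m : Nat) :
    (t.reverse.take m).sum = (t.drop (t.length - m)).sum := by
  rw [List.take_reverse, List.sum_reverse]

-- Main loop correspondence: on an ascendingly sorted t of length ≥ 2, A's countdown
-- at index i equals B's pass over t.reverse resumed at position t.length-1-i, provided
-- every already-inspected split was strictly 'suffix < prefix'.
lemma loop_eq (t : List Int) (hsort : t.Pairwise (· ≤ ·)) (hn : 2 ≤ t.length) :
    ∀ i : Nat, i + 1 ≤ t.length →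
    (∀ j : Nat, i < j → j + 1 ≤ t.length → (t.drop j).sum < (t.take j).sum) →
    minSubsequenceLoopA t i =
      minSubsequenceLoopB t.reverse t.sum (t.reverse.drop (t.length - 1 - i))
        ((t.reverse.take (t.length - 1 - i)).sum) (t.length - 1 - i) := by
  intro i
  induction i with
  | zero =>
    intro _ hprev
    -- A's loop can never fall through for length ≥ 2: the splits at j = 1 and
    -- j = length-1 cannot both be strictly 'suffix < prefix' on a sorted list.
    exfalso
    have h1 : (t.drop 1).sum < (t.take 1).sum := hprev 1 (by omega) (by omega)
    have h2 : (t.drop (t.length - 1)).sum < (t.take (t.length - 1)).sum :=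
      hprev (t.length - 1) (by omega) (by omega)
    have hs1 : (t.take 1).sum + (t.drop 1).sum = t.sum := List.sum_take_add_sum_drop t 1
    have hsl : (t.take (t.length - 1)).sum + (t.drop (t.length - 1)).sum = t.sum :=
      List.sum_take_add_sum_drop t (t.length - 1)
    have ht0 : (t.take 1).sum = t[0]'(by omega) := by
      have := List.sum_take_succ t 0 (by omega)
      simpa using this
    have htl : (t.drop (t.length - 1)).sum = t[t.length - 1]'(by omega) := by
      rw [List.drop_eq_getElem_cons (by omega : t.length - 1 < t.length)]
      have : t.drop (t.length - 1 + 1) = [] := List.drop_of_length_le (by omega)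
      simp [this]
    have hle : t[0]'(by omega) ≤ t[t.length - 1]'(by omega) :=
      (List.pairwise_iff_getElem.mp hsort) 0 (t.length - 1) (by omega) (by omega) (by omega)
    omega
  | succ i ih =>
    intro hi hprev
    have hk : t.length - 1 - (i+1) < t.reverse.length := by simp; omega
    rw [List.drop_eq_getElem_cons hk]
    have hacc : (t.reverse.take (t.length - 1 - (i+1))).sum + t.reverse[t.length - 1 - (i+1)] =
        (t.drop (i+1)).sum := by
      have := List.sum_take_succ t.reverse (t.length - 1 - (i+1)) hk
      rw [← this]
      have he : t.length - 1 - (i+1) + 1 = t.length - (i+1) := by omega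
      rw [he, take_rev_sum]
      congr 2
      omega
    have hrest : t.sum - (t.drop (i+1)).sum = (t.take (i+1)).sum := by
      have := List.sum_take_add_sum_drop t (i+1); omega
    have hsliceF : PySem.List.slice t (some ((i+1 : Nat) : Int)) none = t.drop (i+1) :=
      PySem.List.slice_from_natCast t (i+1)
    have hsliceT : PySem.List.slice t none (some ((i+1 : Nat) : Int)) = t.take (i+1) :=
      PySem.List.slice_to_natCast t (i+1)
    have hsliceF' : PySem.List.slice t (some ((i : Nat) : Int)) none = t.drop i :=
      PySem.List.slice_from_natCast t i
    show (if (PySem.List.slice t (some ((i+1 : Nat) : Int)) none).sum >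
             (PySem.List.slice t none (some ((i+1 : Nat) : Int))).sum then
            (PySem.List.slice t (some ((i+1 : Nat) : Int)) none).reverse
          else if (PySem.List.slice t (some ((i+1 : Nat) : Int)) none).sum =
                  (PySem.List.slice t none (some ((i+1 : Nat) : Int))).sum then
            (PySem.List.slice t (some ((i : Nat) : Int)) none).reverse
          else minSubsequenceLoopA t i) = _
    rw [hsliceF, hsliceT, hsliceF']
    show _ = (if (t.reverse.take (t.length - 1 - (i+1))).sum + t.reverse[t.length - 1 - (i+1)] >
                  t.sum - ((t.reverse.take (t.length - 1 - (i+1))).sum + t.reverse[t.length - 1 - (i+1)]) then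
                t.reverse.take (t.length - 1 - (i+1) + 1)
              else if (t.reverse.take (t.length - 1 - (i+1))).sum + t.reverse[t.length - 1 - (i+1)] =
                      t.sum - ((t.reverse.take (t.length - 1 - (i+1))).sum + t.reverse[t.length - 1 - (i+1)]) then
                t.reverse.take (t.length - 1 - (i+1) + 2)
              else minSubsequenceLoopB t.reverse t.sum (t.reverse.drop (t.length - 1 - (i+1) + 1))
                     ((t.reverse.take (t.length - 1 - (i+1))).sum + t.reverse[t.length - 1 - (i+1)])
                     (t.length - 1 - (i+1) + 1))
    rw [hacc, hrest]
    split_ifs with h1 h2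
    · rw [List.take_reverse]
      congr 2
      omega
    · rw [List.take_reverse]
      congr 2
      omega
    · have he1 : t.length - 1 - (i+1) + 1 = t.length - 1 - i := by omega
      rw [he1, ← hacc]
      have hacc' : (t.reverse.take (t.length - 1 - (i+1))).sum + t.reverse[t.length - 1 - (i+1)] =
          (t.reverse.take (t.length - 1 - i)).sum := by
        have := List.sum_take_succ t.reverse (t.length - 1 - (i+1)) hk
        rw [← this, he1]
      rw [hacc']
      exact ih (by omega) (fun j hj hjl => by
        rcases Nat.lt_or_ge (i+1) j with h | h
        · exact hprev j h hjl
        · have : j = i + 1 := by omega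
          subst this
          have hsd := List.sum_take_add_sum_drop t (i+1)
          omega)

-- ===== VERDICT (by name: the statement is the Claim_ definition above) =====
theorem minSubsequence_spec : Claim_equal_minSubsequence := by
  intro nums _ hpre
  unfold Spec_minSubsequence minSubsequence minSubsequence_alt
  by_cases h1 : nums.length = 1
  · simp [h1]
  · have hne : nums ≠ [] := hpre
    have hlen : 2 ≤ nums.length := by
      cases nums with
      | nil => exact absurd rfl hne
      | cons a l =>
        cases l with
        | nil => simp at h1
        | cons b l' => simp
    simp only [beq_iff_eq, h1, if_false]
    set t := PySem.List.sorted nums (fun x => x) false with ht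
    have htlen : t.length = nums.length := PySem.List.length_sorted nums (fun x => x) false
    have hsort : t.Pairwise (· ≤ ·) := by
      simpa using PySem.List.sorted_pairwise nums (fun x => x)
    rw [sorted_desc_eq_rev, List.sum_reverse, ← ht]
    have := loop_eq t hsort (by omega) (t.length - 1) (by omega) (fun j hj hjl => by omega)
    rw [this]
    have hz : t.length - 1 - (t.length - 1) = 0 := by omega
    rw [hz]
    simp
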